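-- pv_equiv track=rewrite | github.com/MineLT/CubeSolver | solver with software/outils.py | invMove
-- ===== SOURCE A (Python) =====
-- inv = {"R" : "R'", "R'" : "R", "R2" : "R2",
--      "F" : "F'", "F'" : "F", "F2" : "D2",
--      "L" : "L'", "L'" : "L", "L2" : "L2",
--      "U" : "U'", "U'" : "U", "U2" : "U2",
--      "D" : "D'", "D'" : "D", "D2" : "D2",
--      "B" : "B'", "B'" : "B", "B2" : "B2",
--      "E" : "E'", "E'" : "E", "E2" : "E2",
--      "S" : "S'", "S'" : "S", "S2" : "S2",
--      "M" : "M'", "M'" : "M", "M2" : "M2"}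
--
-- def invMove(moves):
--
--     conv = ""
--
--     for i in range(len(moves)):
--
--         move = moves[i]
--
--         # Les mouvements étant indiqués littéralement
--         # (R', R, ...), il faut vérifier le caractère
--         # suivant afin de vérifier si le mouvement est
--         # en "'" ou "2"
--         try:
--
--             if moves[i+1] == "'":
--
--                 move += "'"
--             elif moves[i+1] == "2":
--
--                 move += "2"
--         except:
--             pass
--
--         try:
--             conv += inv[move]
--         except:
--             pass
--
--     return conv
-- ===== SOURCE B (Python) =====
-- inv = {"R" : "R'", "R'" : "R", "R2" : "R2",
--      "F" : "F'", "F'" : "F", "F2" : "D2",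
--      "L" : "L'", "L'" : "L", "L2" : "L2",
--      "U" : "U'", "U'" : "U", "U2" : "U2",
--      "D" : "D'", "D'" : "D", "D2" : "D2",
--      "B" : "B'", "B'" : "B", "B2" : "B2",
--      "E" : "E'", "E'" : "E", "E2" : "E2",
--      "S" : "S'", "S'" : "S", "S2" : "S2",
--      "M" : "M'", "M'" : "M", "M2" : "M2"}
--
-- def invMove(moves):
--     # single left-to-right pass carrying one pending character: a modifier
--     # ("'" or "2") closes the pending token, anything else flushes it and
--     # becomes the new pending character; unknown tokens vanish via .get
--     out = []
--     pending = None
--     for c in moves: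
--         if c in "'2" and pending is not None:
--             out.append(inv.get(pending + c, ""))
--             pending = None
--         else:
--             if pending is not None:
--                 out.append(inv.get(pending, ""))
--             pending = c
--     if pending is not None:
--         out.append(inv.get(pending, ""))
--     return "".join(out)
-- ===== Notes on version B (the rewrite author's own statement) =====
-- stated objective: simpler
-- what changed: Replaced A's index loop that visits every character, peeks at moves[i+1] with try/except and relies on silently failed dict lookups at modifier positions, by a single char-wise pass carrying one pending character that tokenizes move+modifier and flushes each token through inv.get once; collecting parts in a list joined at the end avoids repeated string concatenation and per-character exception handling.
import Mathlib
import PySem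

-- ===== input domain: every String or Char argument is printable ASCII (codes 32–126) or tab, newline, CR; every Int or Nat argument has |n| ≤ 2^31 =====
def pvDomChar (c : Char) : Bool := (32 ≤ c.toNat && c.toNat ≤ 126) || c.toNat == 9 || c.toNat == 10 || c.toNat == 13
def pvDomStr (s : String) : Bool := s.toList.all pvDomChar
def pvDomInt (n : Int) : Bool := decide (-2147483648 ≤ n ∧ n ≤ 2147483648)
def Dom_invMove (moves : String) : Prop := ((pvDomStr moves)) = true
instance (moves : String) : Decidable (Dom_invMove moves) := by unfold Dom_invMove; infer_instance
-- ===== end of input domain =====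

-- B replaces A's index loop with failed lookups at modifier positions by a single
-- char-wise pass carrying one pending character (a tokenizing state machine); objective: simpler.

-- the module-level `inv` dict, verbatim (insertion order)
def invDict : PySem.Dict String String := PySem.Dict.ofList
  [("R", "R'"), ("R'", "R"), ("R2", "R2"),
   ("F", "F'"), ("F'", "F"), ("F2", "D2"),
   ("L", "L'"), ("L'", "L"), ("L2", "L2"),
   ("U", "U'"), ("U'", "U"), ("U2", "U2"),
   ("D", "D'"), ("D'", "D"), ("D2", "D2"),
   ("B", "B'"), ("B'", "B"), ("B2", "B2"),
   ("E", "E'"), ("E'", "E"), ("E2", "E2"),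
   ("S", "S'"), ("S'", "S"), ("S2", "S2"),
   ("M", "M'"), ("M'", "M"), ("M2", "M2")]

-- ===== PORT A =====
-- A's `if moves[i+1] == "'": … elif moves[i+1] == "2": …` (IndexError ⇒ bare `move`)
def tokenOf (c : Char) (nxt : Option Char) : String :=
  match nxt with
  | some n => if n = '\'' then String.ofList [c, '\''] else if n = '2' then String.ofList [c, '2'] else String.ofList [c]
  | none => String.ofList [c]

-- A's `for i in range(len(moves))`: each step sees moves[i] and moves[i+1] (= head of the rest)
def invMoveLoop (conv : String) : List Char → String
  | [] => conv
  | c :: rest =>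
      invMoveLoop (conv ++ ((invDict.get? (tokenOf c rest.head?)).getD "")) rest

def invMove (moves : String) : String := invMoveLoop "" moves.toList

-- ===== PORT B =====
-- one step of B's loop: state = (pending character, output so far)
def invStep (st : Option Char × String) (c : Char) : Option Char × String :=
  match st.1 with
  | some p =>
      if c = '\'' ∨ c = '2' then
        (none, st.2 ++ ((invDict.get? (String.ofList [p, c])).getD ""))
      else
        (some c, st.2 ++ ((invDict.get? (String.ofList [p])).getD ""))
  | none => (some c, st.2)

def invMove_alt (moves : String) : String :=
  let fin := moves.toList.foldl invStep (none, "")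
  match fin.1 with
  | some p => fin.2 ++ ((invDict.get? (String.ofList [p])).getD "")
  | none => fin.2

-- ===== PRECONDITION & SPEC =====
def Spec_invMove (moves : String) (out : String) : Prop := out = invMove_alt moves
instance (moves : String) (out : String) : Decidable (Spec_invMove moves out) := by unfold Spec_invMove; infer_instance

-- ===== CLAIM (what is proved, stated in full; the proofs are below) =====
def Claim_equal_invMove : Prop := ∀ (moves : String), Dom_invMove moves → Spec_invMove moves (invMove moves)

-- ===== LEMMAS AND PROOFS =====

-- final flush of B's state
def invFlush (st : Option Char × String) : String :=
  match st.1 with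
  | some p => st.2 ++ ((invDict.get? (String.ofList [p])).getD "")
  | none => st.2

theorem invMove_alt_eq_flush (moves : String) :
    invMove_alt moves = invFlush (moves.toList.foldl invStep (none, "")) := rfl

-- any token starting with a modifier character is absent from the dict
theorem mod_token_lookup (c : Char) (nxt : Option Char) (hc : c = '\'' ∨ c = '2') :
    (invDict.get? (tokenOf c nxt)).getD "" = "" := by
  rcases hc with h | h <;> subst h <;> rcases nxt with _ | n
  · decide
  · simp only [tokenOf]; split_ifs with h1 h2
    · subst h1; decide
    · subst h2; decide
    · decide
  · decide
  · simp only [tokenOf]; split_ifs with h1 h2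
    · subst h1; decide
    · subst h2; decide
    · decide

theorem invMain (l : List Char) :
    (∀ acc : String, invFlush (l.foldl invStep (none, acc)) = invMoveLoop acc l) ∧
    (∀ (p : Char) (acc : String),
      invFlush (l.foldl invStep (some p, acc)) = invMoveLoop acc (p :: l)) := by
  induction l with
  | nil =>
      refine ⟨fun acc => rfl, fun p acc => ?_⟩
      simp [invFlush, invMoveLoop, tokenOf]
  | cons c rest ih =>
      obtain ⟨ih1, ih2⟩ := ih
      constructor
      · intro acc
        show invFlush (rest.foldl invStep (invStep (none, acc) c)) = _
        rw [show invStep (none, acc) c = (some c, acc) from rfl]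
        exact ih2 c acc
      · intro p acc
        show invFlush (rest.foldl invStep (invStep (some p, acc) c)) = _
        by_cases hc : c = '\'' ∨ c = '2'
        · rw [show invStep (some p, acc) c
              = (none, acc ++ ((invDict.get? (String.ofList [p, c])).getD "")) from by
                simp [invStep, hc]]
          rw [ih1]
          show _ = invMoveLoop (acc ++ ((invDict.get? (tokenOf p (some c))).getD ""))
                    (c :: rest)
          have ht : tokenOf p (some c) = String.ofList [p, c] := by
            rcases hc with h | h <;> subst h <;> simp [tokenOf]
          rw [ht]
          show invMoveLoop _ rest
              = invMoveLoop (_ ++ ((invDict.get? (tokenOf c rest.head?)).getD "")) rest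
          rw [mod_token_lookup c rest.head? hc, String.append_empty]
        · rw [show invStep (some p, acc) c
              = (some c, acc ++ ((invDict.get? (String.ofList [p])).getD "")) from by
                simp [invStep, hc]]
          rw [ih2]
          show _ = invMoveLoop (acc ++ ((invDict.get? (tokenOf p (some c))).getD ""))
                    (c :: rest)
          have ht : tokenOf p (some c) = String.ofList [p] := by
            push Not at hc
            simp [tokenOf, hc.1, hc.2]
          rw [ht]

-- ===== VERDICT (by name: the statement is the Claim_ definition above) =====
theorem invMove_spec : Claim_equal_invMove := by
  intro moves _
  show invMove moves = invMove_alt moves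
  rw [invMove_alt_eq_flush, (invMain moves.toList).1 ""]
  rfl
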